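-- pv_equiv track=rewrite | github.com/silver-bulet/ForenWAF-Monitor | core/modsecurity.py | _extract_security_level
-- ===== SOURCE A (Python) =====
-- from typing import List, Dict, Optional
--
-- def _extract_security_level(messages: List[Dict]) -> str:
--     """Extract security level"""
--     severity_levels = {
--         "CRITICAL": 4,
--         "ERROR": 3,
--         "WARNING": 2,
--         "NOTICE": 1,
--         "INFO": 0
--     }
--     current_level = 0
--     highest_severity = "INFO"
--
--     for message in messages:
--         severity = message.get('severity', '').upper()
--         if severity in severity_levels and severity_levels[severity] > current_level:
--             current_level = severity_levels[severity]
--             highest_severity = severity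
--
--     return highest_severity
-- ===== SOURCE B (Python) =====
-- def _extract_security_level(messages):
--     """Extract security level"""
--     present = {m.get('severity', '').upper() for m in messages}
--     for name in ("CRITICAL", "ERROR", "WARNING", "NOTICE", "INFO"):
--         if name in present:
--             return name
--     return "INFO"
-- ===== Notes on version B (the rewrite author's own statement) =====
-- stated objective: simpler
-- what changed: Replaces the running-max scan with dict lookups by a set of present severity names followed by a first-match walk over the fixed priority tuple.
import Mathlib
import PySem

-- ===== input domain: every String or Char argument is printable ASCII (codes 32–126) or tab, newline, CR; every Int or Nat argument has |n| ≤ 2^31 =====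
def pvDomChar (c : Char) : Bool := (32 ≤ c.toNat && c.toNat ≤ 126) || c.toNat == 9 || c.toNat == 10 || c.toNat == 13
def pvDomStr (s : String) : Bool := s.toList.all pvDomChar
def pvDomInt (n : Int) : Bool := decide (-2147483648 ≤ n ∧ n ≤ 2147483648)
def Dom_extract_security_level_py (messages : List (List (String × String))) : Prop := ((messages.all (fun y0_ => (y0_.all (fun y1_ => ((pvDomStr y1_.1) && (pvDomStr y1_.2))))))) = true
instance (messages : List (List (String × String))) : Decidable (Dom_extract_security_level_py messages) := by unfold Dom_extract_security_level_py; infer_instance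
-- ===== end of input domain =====

-- B replaces A's running-max scan with a set of present severity names plus a
-- first-match walk over the fixed priority tuple (objective: simpler).

-- ===== PORT A =====
def extract_security_level_py (messages : List (List (String × String))) : String :=
  let severity_levels : PySem.Dict String Int :=
    PySem.Dict.mk [("CRITICAL", 4), ("ERROR", 3), ("WARNING", 2), ("NOTICE", 1), ("INFO", 0)]
  let st : Int × String := messages.foldl (fun acc message =>
    let severity := PySem.Str.upper ((PySem.Dict.mk message).getD "severity" "")
    -- 'severity in severity_levels and severity_levels[severity] > current_level'
    match severity_levels.get? severity with
    | some v => if acc.1 < v then (v, severity) else acc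
    | none => acc) (0, "INFO")
  st.2

-- ===== PORT B =====
def extract_security_level_py_alt (messages : List (List (String × String))) : String :=
  let present : PySem.Set String :=
    PySem.Set.ofList (messages.map (fun m => PySem.Str.upper ((PySem.Dict.mk m).getD "severity" "")))
  match ["CRITICAL", "ERROR", "WARNING", "NOTICE", "INFO"].find?
          (fun name => PySem.Set.contains present name) with
  | some name => name
  | none => "INFO"

-- ===== PRECONDITION & SPEC =====
def Spec_extract_security_level_py (messages : List (List (String × String))) (out : String) : Prop := out = extract_security_level_py_alt messages
instance (messages : List (List (String × String))) (out : String) : Decidable (Spec_extract_security_level_py messages out) := by unfold Spec_extract_security_level_py; infer_instance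

-- ===== CLAIM (what is proved, stated in full; the proofs are below) =====
def Claim_equal_extract_security_level_py : Prop := ∀ (messages : List (List (String × String))), Dom_extract_security_level_py messages → Spec_extract_security_level_py messages (extract_security_level_py messages)

-- ===== LEMMAS AND PROOFS =====

/-- the uppercased severity of a message -/
def pvSevUp (m : List (String × String)) : String :=
  PySem.Str.upper ((PySem.Dict.mk m).getD "severity" "")

/-- numeric rank of a severity name (0 for INFO and anything unknown) -/
def pvSv (s : String) : Nat :=
  if s = "CRITICAL" then 4 else if s = "ERROR" then 3 else if s = "WARNING" then 2
  else if s = "NOTICE" then 1 else 0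

/-- name of a rank -/
def pvNm (l : Nat) : String :=
  if l = 4 then "CRITICAL" else if l = 3 then "ERROR" else if l = 2 then "WARNING"
  else if l = 1 then "NOTICE" else "INFO"

/-- maximum rank present in the list -/
def pvMx (messages : List (List (String × String))) : Nat :=
  messages.foldr (fun m acc => max (pvSv (pvSevUp m)) acc) 0

theorem pvSv_le_four (s : String) : pvSv s ≤ 4 := by
  unfold pvSv; split_ifs <;> omega

theorem pvMx_le_four (messages : List (List (String × String))) : pvMx messages ≤ 4 := by
  induction messages with
  | nil => simp [pvMx]
  | cons m ms ih =>
    have hstep : pvMx (m :: ms) = max (pvSv (pvSevUp m)) (pvMx ms) := rfl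
    rw [hstep]
    exact max_le (pvSv_le_four _) ih

theorem pvSv_eq_pos_iff (s : String) (k : Nat) (h1 : 1 ≤ k) (h4 : k ≤ 4) :
    pvSv s = k ↔ s = pvNm k := by
  unfold pvSv pvNm
  interval_cases k <;> split_ifs <;> simp_all

theorem pvSv_le_pvMx {m : List (String × String)} {messages : List (List (String × String))}
    (h : m ∈ messages) : pvSv (pvSevUp m) ≤ pvMx messages := by
  induction messages with
  | nil => cases h
  | cons x ms ih =>
    have hstep : pvMx (x :: ms) = max (pvSv (pvSevUp x)) (pvMx ms) := rfl
    rw [hstep]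
    rcases List.mem_cons.mp h with h | h
    · subst h; exact le_max_left _ _
    · exact le_trans (ih h) (le_max_right _ _)

theorem pvMx_mem {messages : List (List (String × String))}
    (h : 0 < pvMx messages) : ∃ m ∈ messages, pvSv (pvSevUp m) = pvMx messages := by
  induction messages with
  | nil => simp [pvMx] at h
  | cons x ms ih =>
    have hstep : pvMx (x :: ms) = max (pvSv (pvSevUp x)) (pvMx ms) := rfl
    rw [hstep] at h ⊢
    rcases Nat.le_total (pvMx ms) (pvSv (pvSevUp x)) with hle | hle
    · exact ⟨x, List.mem_cons_self, (max_eq_left hle).symm⟩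
    · rw [max_eq_right hle] at h ⊢
      obtain ⟨m, hm, he⟩ := ih h
      exact ⟨m, List.mem_cons_of_mem _ hm, he⟩

/-- one step of A's fold, in canonical form -/
theorem pvStepA (l : Nat) (hl : l ≤ 4) (m : List (String × String)) :
    (fun (acc : Int × String) message =>
      let severity := PySem.Str.upper ((PySem.Dict.mk message).getD "severity" "")
      match (PySem.Dict.mk [("CRITICAL", (4:Int)), ("ERROR", 3), ("WARNING", 2), ("NOTICE", 1), ("INFO", 0)]).get? severity with
      | some v => if acc.1 < v then (v, severity) else acc
      | none => acc) ((l : Int), pvNm l) m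
    = (((max l (pvSv (pvSevUp m)) : Nat) : Int), pvNm (max l (pvSv (pvSevUp m)))) := by
  simp only [pvSevUp, PySem.Dict.get?_mk_cons]
  generalize PySem.Str.upper ((PySem.Dict.mk m).getD "severity" "") = s
  by_cases h1 : s = "CRITICAL"
  · subst h1; interval_cases l <;> simp [pvSv, pvNm]
  · by_cases h2 : s = "ERROR"
    · subst h2; interval_cases l <;> simp [pvSv, pvNm]
    · by_cases h3 : s = "WARNING"
      · subst h3; interval_cases l <;> simp [pvSv, pvNm]
      · by_cases h4 : s = "NOTICE"
        · subst h4; interval_cases l <;> simp [pvSv, pvNm]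
        · by_cases h5 : s = "INFO"
          · subst h5; interval_cases l <;> simp [pvSv, pvNm]
          · have hsv : pvSv s = 0 := by unfold pvSv; split_ifs <;> simp_all
            have e1 : ¬("CRITICAL" = s) := fun h => h1 h.symm
            have e2 : ¬("ERROR" = s) := fun h => h2 h.symm
            have e3 : ¬("WARNING" = s) := fun h => h3 h.symm
            have e4 : ¬("NOTICE" = s) := fun h => h4 h.symm
            have e5 : ¬("INFO" = s) := fun h => h5 h.symm
            simp [beq_iff_eq, e1, e2, e3, e4, e5, hsv, PySem.Dict.get?]

/-- A's fold with any step function of the canonical shape -/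
theorem pvFoldGen (f : Int × String → List (String × String) → Int × String)
    (hstep : ∀ (l : Nat), l ≤ 4 → ∀ m, f ((l : Int), pvNm l) m
      = (((max l (pvSv (pvSevUp m)) : Nat) : Int), pvNm (max l (pvSv (pvSevUp m)))))
    (messages : List (List (String × String))) :
    ∀ (l : Nat), l ≤ 4 → messages.foldl f ((l : Int), pvNm l)
      = (((max l (pvMx messages) : Nat) : Int), pvNm (max l (pvMx messages))) := by
  induction messages with
  | nil => intro l hl; simp [pvMx]
  | cons m ms ih =>
    intro l hl
    rw [List.foldl_cons, hstep l hl m,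
        ih (max l (pvSv (pvSevUp m))) (max_le hl (pvSv_le_four _))]
    have hstep' : pvMx (m :: ms) = max (pvSv (pvSevUp m)) (pvMx ms) := rfl
    rw [hstep', max_assoc]

theorem pvA_eq (messages : List (List (String × String))) :
    extract_security_level_py messages = pvNm (pvMx messages) := by
  have h := pvFoldGen (fun (acc : Int × String) message =>
      let severity := PySem.Str.upper ((PySem.Dict.mk message).getD "severity" "")
      match (PySem.Dict.mk [("CRITICAL", (4:Int)), ("ERROR", 3), ("WARNING", 2), ("NOTICE", 1), ("INFO", 0)]).get? severity with
      | some v => if acc.1 < v then (v, severity) else acc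
      | none => acc) pvStepA messages 0 (by omega)
  have h2 : extract_security_level_py messages = pvNm (max 0 (pvMx messages)) :=
    congrArg Prod.snd h
  rw [h2, Nat.zero_max]

theorem pvContains_iff (messages : List (List (String × String))) (name : String) :
    PySem.Set.contains (PySem.Set.ofList (messages.map (fun m => PySem.Str.upper ((PySem.Dict.mk m).getD "severity" "")))) name = true
    ↔ ∃ m ∈ messages, pvSevUp m = name := by
  rw [PySem.Set.contains_iff, PySem.Set.mem_ofList, List.mem_map]
  constructor
  · rintro ⟨m, hm, he⟩; exact ⟨m, hm, he⟩
  · rintro ⟨m, hm, he⟩; exact ⟨m, hm, he⟩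

theorem pvHas_iff (messages : List (List (String × String))) (k : Nat) (h1 : 1 ≤ k) (h4 : k ≤ 4) :
    PySem.Set.contains (PySem.Set.ofList (messages.map (fun m => PySem.Str.upper ((PySem.Dict.mk m).getD "severity" "")))) (pvNm k) = true
    ↔ ∃ m ∈ messages, pvSv (pvSevUp m) = k := by
  rw [pvContains_iff]
  constructor
  · rintro ⟨m, hm, he⟩; exact ⟨m, hm, (pvSv_eq_pos_iff _ k h1 h4).mpr he⟩
  · rintro ⟨m, hm, he⟩; exact ⟨m, hm, (pvSv_eq_pos_iff _ k h1 h4).mp he⟩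

theorem pvNotEx (messages : List (List (String × String))) (name : String)
    (hc : PySem.Set.contains (PySem.Set.ofList (messages.map (fun m => PySem.Str.upper ((PySem.Dict.mk m).getD "severity" "")))) name = false) :
    ¬∃ a ∈ messages, PySem.Str.upper ((PySem.Dict.mk a).getD "severity" "") = name := by
  intro hex
  rw [(pvContains_iff messages name).mpr hex] at hc
  exact Bool.true_eq_false.mp hc

theorem pvEx (messages : List (List (String × String))) (name : String)
    (hc : PySem.Set.contains (PySem.Set.ofList (messages.map (fun m => PySem.Str.upper ((PySem.Dict.mk m).getD "severity" "")))) name = true) :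
    ∃ a ∈ messages, PySem.Str.upper ((PySem.Dict.mk a).getD "severity" "") = name :=
  (pvContains_iff messages name).mp hc

theorem pvB_eq (messages : List (List (String × String))) :
    extract_security_level_py_alt messages = pvNm (pvMx messages) := by
  unfold extract_security_level_py_alt
  have hbound := pvMx_le_four messages
  have hno : ∀ k, pvMx messages < k → k ≤ 4 →
      PySem.Set.contains (PySem.Set.ofList (messages.map (fun m => PySem.Str.upper ((PySem.Dict.mk m).getD "severity" "")))) (pvNm k) = false := by
    intro k hk h4
    by_contra hc
    obtain ⟨m, hm, he⟩ := (pvHas_iff messages k (by omega) h4).mp (by simpa using hc)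
    have := pvSv_le_pvMx hm
    omega
  have hyes : 0 < pvMx messages →
      PySem.Set.contains (PySem.Set.ofList (messages.map (fun m => PySem.Str.upper ((PySem.Dict.mk m).getD "severity" "")))) (pvNm (pvMx messages)) = true := by
    intro hpos
    exact (pvHas_iff messages _ hpos hbound).mpr (pvMx_mem hpos)
  interval_cases h : pvMx messages
  · have c4 : PySem.Set.contains (PySem.Set.ofList (messages.map (fun m => PySem.Str.upper ((PySem.Dict.mk m).getD "severity" "")))) "CRITICAL" = false := by
      simpa [pvNm] using hno 4 (by omega) (by omega)
    have c3 : PySem.Set.contains (PySem.Set.ofList (messages.map (fun m => PySem.Str.upper ((PySem.Dict.mk m).getD "severity" "")))) "ERROR" = false := by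
      simpa [pvNm] using hno 3 (by omega) (by omega)
    have c2 : PySem.Set.contains (PySem.Set.ofList (messages.map (fun m => PySem.Str.upper ((PySem.Dict.mk m).getD "severity" "")))) "WARNING" = false := by
      simpa [pvNm] using hno 2 (by omega) (by omega)
    have c1 : PySem.Set.contains (PySem.Set.ofList (messages.map (fun m => PySem.Str.upper ((PySem.Dict.mk m).getD "severity" "")))) "NOTICE" = false := by
      simpa [pvNm] using hno 1 (by omega) (by omega)
    cases hI : PySem.Set.contains (PySem.Set.ofList (messages.map (fun m => PySem.Str.upper ((PySem.Dict.mk m).getD "severity" "")))) "INFO" with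
    | false => simp [List.find?, pvNotEx _ _ c4, pvNotEx _ _ c3, pvNotEx _ _ c2, pvNotEx _ _ c1, pvNotEx _ _ hI, pvNm]
    | true => simp [List.find?, pvNotEx _ _ c4, pvNotEx _ _ c3, pvNotEx _ _ c2, pvNotEx _ _ c1, pvEx _ _ hI, pvNm]
  · have c4 : PySem.Set.contains (PySem.Set.ofList (messages.map (fun m => PySem.Str.upper ((PySem.Dict.mk m).getD "severity" "")))) "CRITICAL" = false := by
      simpa [pvNm] using hno 4 (by omega) (by omega)
    have c3 : PySem.Set.contains (PySem.Set.ofList (messages.map (fun m => PySem.Str.upper ((PySem.Dict.mk m).getD "severity" "")))) "ERROR" = false := by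
      simpa [pvNm] using hno 3 (by omega) (by omega)
    have c2 : PySem.Set.contains (PySem.Set.ofList (messages.map (fun m => PySem.Str.upper ((PySem.Dict.mk m).getD "severity" "")))) "WARNING" = false := by
      simpa [pvNm] using hno 2 (by omega) (by omega)
    have y1 : PySem.Set.contains (PySem.Set.ofList (messages.map (fun m => PySem.Str.upper ((PySem.Dict.mk m).getD "severity" "")))) "NOTICE" = true := by
      simpa [pvNm] using hyes (by omega)
    simp [List.find?, pvNotEx _ _ c4, pvNotEx _ _ c3, pvNotEx _ _ c2, pvEx _ _ y1, pvNm]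
  · have c4 : PySem.Set.contains (PySem.Set.ofList (messages.map (fun m => PySem.Str.upper ((PySem.Dict.mk m).getD "severity" "")))) "CRITICAL" = false := by
      simpa [pvNm] using hno 4 (by omega) (by omega)
    have c3 : PySem.Set.contains (PySem.Set.ofList (messages.map (fun m => PySem.Str.upper ((PySem.Dict.mk m).getD "severity" "")))) "ERROR" = false := by
      simpa [pvNm] using hno 3 (by omega) (by omega)
    have y2 : PySem.Set.contains (PySem.Set.ofList (messages.map (fun m => PySem.Str.upper ((PySem.Dict.mk m).getD "severity" "")))) "WARNING" = true := by
      simpa [pvNm] using hyes (by omega)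
    simp [List.find?, pvNotEx _ _ c4, pvNotEx _ _ c3, pvEx _ _ y2, pvNm]
  · have c4 : PySem.Set.contains (PySem.Set.ofList (messages.map (fun m => PySem.Str.upper ((PySem.Dict.mk m).getD "severity" "")))) "CRITICAL" = false := by
      simpa [pvNm] using hno 4 (by omega) (by omega)
    have y3 : PySem.Set.contains (PySem.Set.ofList (messages.map (fun m => PySem.Str.upper ((PySem.Dict.mk m).getD "severity" "")))) "ERROR" = true := by
      simpa [pvNm] using hyes (by omega)
    simp [List.find?, pvNotEx _ _ c4, pvEx _ _ y3, pvNm]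
  · have y4 : PySem.Set.contains (PySem.Set.ofList (messages.map (fun m => PySem.Str.upper ((PySem.Dict.mk m).getD "severity" "")))) "CRITICAL" = true := by
      simpa [pvNm] using hyes (by omega)
    simp [List.find?, pvEx _ _ y4, pvNm]

-- ===== VERDICT (by name: the statement is the Claim_ definition above) =====
theorem extract_security_level_py_spec : Claim_equal_extract_security_level_py := by
  intro messages _
  unfold Spec_extract_security_level_py
  rw [pvA_eq, pvB_eq]
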